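-- pv_equiv track=rewrite | github.com/conniepocky/password-checker-generator | password.py | checkForThreeInARow
-- ===== SOURCE A (Python) =====
-- def checkForThreeInARow(string, arr):
--
--     string = string.lower()
--     count = 0
--
--     for r in arr:
--         row = "".join(r)
--         for i,v in enumerate(row):
--             if (i+2 >= len(row)):
--                 break
--             if (v + row[i+1] + row[i+2]) in string:
--                 count -= 5
--
--     return count
-- ===== SOURCE B (Python) =====
-- def windows3(s):
--     return [a + b + c for a, b, c in zip(s, s[1:], s[2:])]
--
--
-- def checkForThreeInARow(string, arr):
--     s = string.lower()
--     triples = []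
--     for r in arr:
--         triples += windows3("".join(r))
--     counter = {}
--     for w in triples:
--         counter[w] = counter.get(w, 0) + 1
--     total = 0
--     for w in set(windows3(s)):
--         total += counter.get(w, 0)
--     return -5 * total
-- ===== Notes on version B (the rewrite author's own statement) =====
-- stated objective: faster
-- what changed: Inverts the scan: instead of substring-searching the whole password once per keyboard window, B builds a counter dict of all keyboard length-3 windows and sums counter hits over the set of distinct length-3 windows of the lowercased password.
import Mathlib
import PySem

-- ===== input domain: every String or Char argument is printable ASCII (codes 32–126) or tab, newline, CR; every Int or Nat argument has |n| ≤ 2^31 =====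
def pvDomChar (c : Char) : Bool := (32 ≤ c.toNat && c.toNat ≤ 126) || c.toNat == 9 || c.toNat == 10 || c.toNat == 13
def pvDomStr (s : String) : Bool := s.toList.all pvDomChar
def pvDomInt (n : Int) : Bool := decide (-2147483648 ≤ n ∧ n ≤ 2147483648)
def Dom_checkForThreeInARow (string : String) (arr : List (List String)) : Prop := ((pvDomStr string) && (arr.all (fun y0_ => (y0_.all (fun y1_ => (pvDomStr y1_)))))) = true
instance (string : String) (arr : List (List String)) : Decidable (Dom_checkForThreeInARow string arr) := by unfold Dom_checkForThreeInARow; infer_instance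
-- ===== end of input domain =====

-- B inverts the loop: it indexes the keyboard triples in a counter dict once and sums
-- counter hits over the distinct lowercased password windows (objective: faster, measured).

-- ===== PORT A =====
-- the inner 'for i,v in enumerate(row)' with its break: an index loop over row
def pvLoopA (s row : List Char) (i : Nat) (count : Int) : Int :=
  if i < row.length then
    if i + 2 ≥ row.length then count
    else
      pvLoopA s row (i + 1)
        (if PySem.Chars.isIn [row.getD i ' ', row.getD (i + 1) ' ', row.getD (i + 2) ' '] s
         then count - 5 else count)
  else count
termination_by row.length - i

def checkForThreeInARow (string : String) (arr : List (List String)) : Int :=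
  let s := PySem.Chars.lower string.toList
  arr.foldl (fun count r => pvLoopA s (PySem.Str.join "" r).toList 0 count) 0

-- ===== PORT B =====
-- windows3(s): all length-3 windows of s, recursively (Source B's helper)
def pvWin3 (s : List Char) : List (List Char) :=
  List.zipWith3 (fun a b c => [a, b, c]) s (PySem.List.slice s (some 1) none) (PySem.List.slice s (some 2) none)

def checkForThreeInARow_alt (string : String) (arr : List (List String)) : Int :=
  let s := PySem.Chars.lower string.toList
  let triples := arr.foldl (fun acc r => acc ++ pvWin3 (PySem.Str.join "" r).toList) []
  let counter := triples.foldl (fun d w => d.modify w 0 (fun x => x + 1)) PySem.Dict.empty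
  let total := ((PySem.Set.ofList (pvWin3 s)).foldl (fun acc w => acc + counter.getD w 0) 0)
  (-5) * total

-- ===== PRECONDITION & SPEC =====
def Spec_checkForThreeInARow (string : String) (arr : List (List String)) (out : Int) : Prop := out = checkForThreeInARow_alt string arr
instance (string : String) (arr : List (List String)) (out : Int) : Decidable (Spec_checkForThreeInARow string arr out) := by unfold Spec_checkForThreeInARow; infer_instance

-- ===== CLAIM (what is proved, stated in full; the proofs are below) =====
def Claim_equal_checkForThreeInARow : Prop := ∀ (string : String) (arr : List (List String)), Dom_checkForThreeInARow string arr → Spec_checkForThreeInARow string arr (checkForThreeInARow string arr)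

-- ===== LEMMAS AND PROOFS =====

-- proof-side structural characterisation of pvWin3
def pvWin3R : List Char → List (List Char)
  | a :: b :: c :: rest => [a, b, c] :: pvWin3R (b :: c :: rest)
  | _ => []

lemma zipWith3_drop_eq (s : List Char) :
    List.zipWith3 (fun a b c => [a, b, c]) s (s.drop 1) (s.drop 2) = pvWin3R s := by
  induction s with
  | nil => rfl
  | cons a t ih =>
    match t, ih with
    | [], _ => rfl
    | [_], _ => rfl
    | b :: c :: r, ih =>
      show ([a, b, c] :: List.zipWith3 (fun a b c => [a, b, c]) (b :: c :: r) ((b :: c :: r).drop 1) ((b :: c :: r).drop 2) : List (List Char))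
        = [a, b, c] :: pvWin3R (b :: c :: r)
      rw [ih]

lemma pvWin3_eq (s : List Char) : pvWin3 s = pvWin3R s := by
  unfold pvWin3
  have h1 : PySem.List.slice s (some 1) none = s.drop 1 := by simp [pysem]
  have h2 : PySem.List.slice s (some 2) none = s.drop 2 := by simp [pysem]
  rw [h1, h2, zipWith3_drop_eq]

lemma pvWin3R_short (l : List Char) (h : l.length < 3) : pvWin3R l = [] := by
  match l with
  | [] => rfl
  | [_] => rfl
  | [_, _] => rfl
  | _ :: _ :: _ :: _ => simp at h; omega

lemma pvWin3R_mem_tail (p : Char) (rest : List Char) (w : List Char)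
    (h : w ∈ pvWin3R rest) : w ∈ pvWin3R (p :: rest) := by
  match rest with
  | [] => simp [pvWin3R] at h
  | [_] => simp [pvWin3R] at h
  | b :: c :: r =>
    rw [show pvWin3R (p :: b :: c :: r) = [p, b, c] :: pvWin3R (b :: c :: r) from rfl]
    exact List.mem_cons_of_mem _ h

lemma mem_pvWin3R (t w : List Char) (h : w ∈ pvWin3R t) : w.length = 3 ∧ w <:+: t := by
  induction t with
  | nil => simp [pvWin3R] at h
  | cons a t ih =>
    match t, h, ih with
    | [], h, _ => simp [pvWin3R] at h
    | [_], h, _ => simp [pvWin3R] at h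
    | b :: c :: r, h, ih =>
      rw [show pvWin3R (a :: b :: c :: r) = [a, b, c] :: pvWin3R (b :: c :: r) from rfl] at h
      rcases List.mem_cons.mp h with h | h
      · subst h
        exact ⟨rfl, ⟨[], r, rfl⟩⟩
      · obtain ⟨hl, hi⟩ := ih h
        exact ⟨hl, List.infix_cons hi⟩

lemma pvWin3R_of_parts (w suf : List Char) (hl : w.length = 3) :
    ∀ pre : List Char, w ∈ pvWin3R (pre ++ (w ++ suf)) := by
  intro pre
  induction pre with
  | nil =>
    match w, hl with
    | [a, b, c], _ =>
      rw [List.nil_append,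
        show ([a, b, c] ++ suf : List Char) = a :: b :: c :: suf from rfl,
        show pvWin3R (a :: b :: c :: suf) = [a, b, c] :: pvWin3R (b :: c :: suf) from rfl]
      exact List.mem_cons_self
  | cons p pre ih =>
    exact pvWin3R_mem_tail p _ w ih

lemma chars_isIn_iff (s w : List Char) (hl : w.length = 3) :
    PySem.Chars.isIn w s = true ↔ w ∈ pvWin3R s := by
  rw [PySem.Chars.isIn_iff_infix]
  constructor
  · rintro ⟨pre, suf, rfl⟩
    simpa [List.append_assoc] using pvWin3R_of_parts w suf hl pre
  · exact fun h => (mem_pvWin3R s w h).2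

lemma pvLoopA_eq (s row : List Char) : ∀ (i : Nat) (c : Int),
    pvLoopA s row i c
      = c - 5 * ((pvWin3R (row.drop i)).countP (fun w => PySem.Chars.isIn w s) : Int) := by
  suffices H : ∀ (n i : Nat) (c : Int), row.length - i ≤ n →
      pvLoopA s row i c
        = c - 5 * ((pvWin3R (row.drop i)).countP (fun w => PySem.Chars.isIn w s) : Int) by
    exact fun i c => H (row.length - i) i c le_rfl
  intro n
  induction n with
  | zero =>
    intro i c hn
    have hlen : row.length ≤ i := by omega
    rw [pvLoopA, if_neg (by omega), List.drop_eq_nil_of_le hlen]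
    simp [pvWin3R]
  | succ n ih =>
    intro i c hn
    rw [pvLoopA]
    split_ifs with h1 h2 hP
    · -- break: i + 2 ≥ row.length
      rw [pvWin3R_short _ (by rw [List.length_drop]; omega)]
      simp
    · -- match found
      have hi1 : i + 1 < row.length := by omega
      have hi2 : i + 2 < row.length := by omega
      have e0 : row.drop i = row[i] :: row.drop (i + 1) := List.drop_eq_getElem_cons h1
      have e1 : row.drop (i + 1) = row[i + 1] :: row.drop (i + 2) := List.drop_eq_getElem_cons hi1
      have e2 : row.drop (i + 2) = row[i + 2] :: row.drop (i + 3) := List.drop_eq_getElem_cons hi2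
      rw [List.getD_eq_getElem row ' ' h1, List.getD_eq_getElem row ' ' hi1,
        List.getD_eq_getElem row ' ' hi2] at hP
      rw [ih (i + 1) _ (by omega), e0, e1, e2,
        show pvWin3R (row[i] :: row[i + 1] :: row[i + 2] :: row.drop (i + 3))
          = [row[i], row[i + 1], row[i + 2]] :: pvWin3R (row[i + 1] :: row[i + 2] :: row.drop (i + 3)) from rfl,
        List.countP_cons]
      simp only [hP, if_true]
      push_cast
      ring
    · -- no match
      have hi1 : i + 1 < row.length := by omega
      have hi2 : i + 2 < row.length := by omega
      have e0 : row.drop i = row[i] :: row.drop (i + 1) := List.drop_eq_getElem_cons h1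
      have e1 : row.drop (i + 1) = row[i + 1] :: row.drop (i + 2) := List.drop_eq_getElem_cons hi1
      have e2 : row.drop (i + 2) = row[i + 2] :: row.drop (i + 3) := List.drop_eq_getElem_cons hi2
      rw [List.getD_eq_getElem row ' ' h1, List.getD_eq_getElem row ' ' hi1,
        List.getD_eq_getElem row ' ' hi2] at hP
      rw [ih (i + 1) _ (by omega), e0, e1, e2,
        show pvWin3R (row[i] :: row[i + 1] :: row[i + 2] :: row.drop (i + 3))
          = [row[i], row[i + 1], row[i + 2]] :: pvWin3R (row[i + 1] :: row[i + 2] :: row.drop (i + 3)) from rfl,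
        List.countP_cons]
      simp only [hP, Bool.false_eq_true, if_false]
      push_cast
      ring
    · -- loop never entered
      rw [List.drop_eq_nil_of_le (by omega : row.length ≤ i)]
      simp [pvWin3R]

def pvRowWin (r : List String) : List (List Char) := pvWin3R (PySem.Str.join "" r).toList

lemma foldlA (s : List Char) (arr : List (List String)) : ∀ c0 : Int,
    arr.foldl (fun count r => pvLoopA s (PySem.Str.join "" r).toList 0 count) c0
      = c0 - 5 * (((arr.flatMap pvRowWin).countP (fun w => PySem.Chars.isIn w s)) : Int) := by
  induction arr with
  | nil => simp
  | cons r arr ih =>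
    intro c0
    rw [List.foldl_cons, ih, pvLoopA_eq, List.drop_zero, List.flatMap_cons, List.countP_append]
    unfold pvRowWin
    push_cast
    ring

lemma indicator_sum (T : List (List Char)) (x : List Char) (hnd : T.Nodup) :
    (T.map (fun w => if x = w then (1 : Int) else 0)).sum
      = if x ∈ T then (1 : Int) else 0 := by
  induction T with
  | nil => simp
  | cons t T ih =>
    simp only [List.map_cons, List.sum_cons, List.nodup_cons] at hnd ⊢
    rcases hnd with ⟨hx, hnd⟩
    by_cases h : x = t
    · subst h; simp [hx, ih hnd]
    · simp [h, ih hnd, List.mem_cons]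

lemma countP_mem_eq_sum_count (T : List (List Char)) (hnd : T.Nodup) :
    ∀ L : List (List Char),
    ((L.countP (fun w => decide (w ∈ T))) : Int)
      = (T.map (fun w => (L.count w : Int))).sum := by
  intro L
  induction L with
  | nil => simp
  | cons x L ih =>
    rw [List.countP_cons]
    have hc : (T.map (fun w => ((x :: L).count w : Int)))
        = T.map (fun w => (L.count w : Int) + if x = w then (1 : Int) else 0) := by
      apply List.map_congr_left
      intro w _
      rw [List.count_cons]
      split_ifs with h h' h'
      · push_cast; ring
      · exact absurd (by exact beq_iff_eq.mp h) h'
      · exact absurd (beq_iff_eq.mpr h') (by simpa using h)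
      · push_cast; ring
    rw [hc, List.sum_map_add, indicator_sum T x hnd, ← ih]
    push_cast
    split_ifs with h h' h'
    · ring
    · exact absurd (of_decide_eq_true h) h'
    · exact absurd (decide_eq_true h') h
    · ring

-- ===== VERDICT (by name: the statement is the Claim_ definition above) =====
theorem checkForThreeInARow_spec : Claim_equal_checkForThreeInARow := by
  intro string arr _
  show checkForThreeInARow string arr = checkForThreeInARow_alt string arr
  show arr.foldl (fun count r => pvLoopA (PySem.Chars.lower string.toList) (PySem.Str.join "" r).toList 0 count) 0
    = (-5) * ((PySem.Set.ofList (pvWin3 (PySem.Chars.lower string.toList))).foldl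
        (fun acc w => acc + ((arr.foldl (fun acc r => acc ++ pvWin3 (PySem.Str.join "" r).toList) []).foldl
            (fun d w => d.modify w 0 (fun x => x + 1)) PySem.Dict.empty).getD w 0) 0)
  simp only [pvWin3_eq]
  rw [foldlA (PySem.Chars.lower string.toList) arr 0,
    PySem.List.foldl_append_eq_flatMap (fun r => pvWin3R (PySem.Str.join "" r).toList) arr [],
    List.nil_append, PySem.List.foldl_add]
  have hmapc : (PySem.Set.ofList (pvWin3R (PySem.Chars.lower string.toList))).map (fun w =>
        ((arr.flatMap (fun r => pvWin3R (PySem.Str.join "" r).toList)).foldl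
          (fun d w => d.modify w 0 (fun x => x + 1)) PySem.Dict.empty).getD w 0)
      = (PySem.Set.ofList (pvWin3R (PySem.Chars.lower string.toList))).map (fun w =>
        ((arr.flatMap pvRowWin).count w : Int)) := by
    apply List.map_congr_left
    intro w _
    rw [PySem.Dict.getD_foldl_modify_add_one, PySem.Dict.getD_empty, zero_add]
    rfl
  rw [hmapc]
  have hP : (arr.flatMap pvRowWin).countP (fun w => PySem.Chars.isIn w (PySem.Chars.lower string.toList))
      = (arr.flatMap pvRowWin).countP
        (fun w => decide (w ∈ PySem.Set.ofList (pvWin3R (PySem.Chars.lower string.toList)))) := by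
    apply List.countP_congr
    intro w hw
    obtain ⟨r, _, hwr⟩ := List.mem_flatMap.mp hw
    have hl : w.length = 3 := (mem_pvWin3R _ w (by exact hwr)).1
    rw [chars_isIn_iff _ w hl]
    simp [PySem.Set.mem_ofList]
  rw [hP, countP_mem_eq_sum_count _ (PySem.Set.nodup_ofList _) (arr.flatMap pvRowWin)]
  ring
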